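-- pv_equiv track=rewrite | github.com/DerDodo/AdventOfCode2024 | solutions/level5.py | construct_inverse_orderings
-- ===== SOURCE A (Python) =====
-- def construct_inverse_orderings(orderings: list[list[int]], pages: list[int]) -> dict[int, list[int]]:
--     pages = set(pages)
--     inverse_orderings_per_page = {}
--     for ordering in orderings:
--         if ordering[0] in pages and ordering[1] in pages:
--             if ordering[1] not in inverse_orderings_per_page:
--                 inverse_orderings_per_page[ordering[1]] = []
--             inverse_orderings_per_page[ordering[1]].append(ordering[0])
--     return inverse_orderings_per_page
-- ===== SOURCE B (Python) =====
-- def construct_inverse_orderings(orderings: list[list[int]], pages: list[int]) -> dict[int, list[int]]: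
--     page_set = set(pages)
--     valid = [(o[0], o[1]) for o in orderings if o[0] in page_set and o[1] in page_set]
--     keys = dict.fromkeys(b for _, b in valid)
--     return {k: [a for a, b in valid if b == k] for k in keys}
-- ===== Notes on version B (the rewrite author's own statement) =====
-- stated objective: alternative
-- what changed: Replaces the single-pass dict-mutation bucketing with a filter-once / dedup-keys / per-key-comprehension grouping pipeline (no dict mutated inside the loop).
import Mathlib
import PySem

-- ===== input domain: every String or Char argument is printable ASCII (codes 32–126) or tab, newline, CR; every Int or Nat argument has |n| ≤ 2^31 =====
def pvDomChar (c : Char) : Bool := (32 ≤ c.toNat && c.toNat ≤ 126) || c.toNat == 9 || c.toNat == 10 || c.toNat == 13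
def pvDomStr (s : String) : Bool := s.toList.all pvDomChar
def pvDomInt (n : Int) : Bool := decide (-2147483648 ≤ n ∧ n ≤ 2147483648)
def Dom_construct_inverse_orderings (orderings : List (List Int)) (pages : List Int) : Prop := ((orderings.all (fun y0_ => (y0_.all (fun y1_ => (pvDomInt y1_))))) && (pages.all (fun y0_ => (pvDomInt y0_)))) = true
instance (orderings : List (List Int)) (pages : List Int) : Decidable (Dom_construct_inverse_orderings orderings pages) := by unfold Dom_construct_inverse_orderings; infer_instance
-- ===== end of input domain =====

-- B replaces A's single-pass dict-mutation bucketing by a filter / dedup-keys / per-key grouping pipeline; same return value (return-value equivalence; neither mutates its arguments observably).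


-- ===== PORT A =====
-- literal transliteration of A: fold over orderings, conditionally create-then-append at key ordering[1]
def construct_inverse_orderings (orderings : List (List Int)) (pages : List Int) : List (Int × List Int) :=
  let pagesSet : PySem.Set Int := PySem.Set.ofList pages
  (orderings.foldl (fun d ordering =>
      match PySem.List.pyGet? ordering 0 with
      | none => d          -- Python raises IndexError here: excluded by Pre_
      | some a =>
        if pagesSet.contains a then
          match PySem.List.pyGet? ordering 1 with
          | none => d      -- Python raises IndexError here: excluded by Pre_
          | some b =>
            if pagesSet.contains b then
              let d1 := if d.contains b then d else d.insert b ([] : List Int)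
              d1.insert b (d1.getD b [] ++ [a])    -- d[b].append(a)
            else d
        else d) PySem.Dict.empty).items

-- ===== PORT B =====
-- B helper: the guard of B's `valid` comprehension (o[0] in page_set and o[1] in page_set)
def pvGuard (pagesSet : PySem.Set Int) (o : List Int) : Option (Int × Int) :=
  match PySem.List.pyGet? o 0 with
  | none => none
  | some a =>
    if pagesSet.contains a then
      match PySem.List.pyGet? o 1 with
      | none => none
      | some b => if pagesSet.contains b then some (a, b) else none
    else none

def construct_inverse_orderings_alt (orderings : List (List Int)) (pages : List Int) : List (Int × List Int) :=
  let pagesSet : PySem.Set Int := PySem.Set.ofList pages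
  let valid := orderings.filterMap (pvGuard pagesSet)
  let keys := PySem.List.dedup (valid.map (·.2))
  keys.map (fun k => (k, valid.filterMap (fun p => if p.2 == k then some p.1 else none)))

-- ===== PRECONDITION & SPEC =====
-- Pre_ excludes exactly the inputs where Python A raises IndexError: an ordering of length 0,
-- or of length 1 whose only element is in pages (so the short-circuit guard reaches ordering[1]).
def Pre_construct_inverse_orderings (orderings : List (List Int)) (pages : List Int) : Prop :=
  ∀ o ∈ orderings, 2 ≤ o.length ∨ (o.length = 1 ∧ o.headI ∉ pages)
instance (orderings : List (List Int)) (pages : List Int) : Decidable (Pre_construct_inverse_orderings orderings pages) := by unfold Pre_construct_inverse_orderings; infer_instance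

def pvWitness_construct_inverse_orderings : List (List Int) × List Int := ([[1, 2], [3, 2], [2, 1]], [1, 2, 3])

def Spec_construct_inverse_orderings (orderings : List (List Int)) (pages : List Int) (out : List (Int × List Int)) : Prop := out = construct_inverse_orderings_alt orderings pages
instance (orderings : List (List Int)) (pages : List Int) (out : List (Int × List Int)) : Decidable (Spec_construct_inverse_orderings orderings pages out) := by unfold Spec_construct_inverse_orderings; infer_instance

-- ===== CLAIM (what is proved, stated in full; the proofs are below) =====
def Claim_equal_construct_inverse_orderings : Prop := ∀ (orderings : List (List Int)) (pages : List Int), Dom_construct_inverse_orderings orderings pages → Pre_construct_inverse_orderings orderings pages → Spec_construct_inverse_orderings orderings pages (construct_inverse_orderings orderings pages)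

-- ===== LEMMAS AND PROOFS =====

-- A's combined "create then append" step, and the pure modify step it equals
def pvStepA (d : PySem.Dict Int (List Int)) (p : Int × Int) : PySem.Dict Int (List Int) :=
  let d1 := if d.contains p.2 then d else d.insert p.2 ([] : List Int)
  d1.insert p.2 (d1.getD p.2 [] ++ [p.1])

def pvStepM (d : PySem.Dict Int (List Int)) (p : Int × Int) : PySem.Dict Int (List Int) :=
  d.modify p.2 [] (fun l => l ++ [p.1])

theorem pvStepA_eq_stepM : pvStepA = pvStepM := by
  funext d p
  unfold pvStepA pvStepM
  by_cases hb : d.contains p.2 = true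
  · simp only [hb, if_true]
    rfl
  · simp only [Bool.not_eq_true] at hb
    simp only [hb, Bool.false_eq_true, if_false]
    have hget : d.get? p.2 = none := (PySem.Dict.get?_eq_none_iff_contains d p.2).2 hb
    have hD : d.getD p.2 [] = [] := by
      show (d.get? p.2).getD [] = []
      rw [hget]; rfl
    rw [PySem.Dict.getD_insert_self, PySem.Dict.insert_insert_self]
    show d.insert p.2 ([] ++ [p.1]) = d.insert p.2 (d.getD p.2 [] ++ [p.1])
    rw [hD]

theorem pvA_fold_guard (pagesSet : PySem.Set Int) (orderings : List (List Int))
    (d : PySem.Dict Int (List Int)) :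
    orderings.foldl (fun d ordering =>
      match PySem.List.pyGet? ordering 0 with
      | none => d
      | some a =>
        if pagesSet.contains a then
          match PySem.List.pyGet? ordering 1 with
          | none => d
          | some b =>
            if pagesSet.contains b then
              let d1 := if d.contains b then d else d.insert b ([] : List Int)
              d1.insert b (d1.getD b [] ++ [a])
            else d
        else d) d
    = (orderings.filterMap (pvGuard pagesSet)).foldl pvStepA d := by
  induction orderings generalizing d with
  | nil => rfl
  | cons o os ih =>
    simp only [List.foldl_cons, List.filterMap_cons]
    unfold pvGuard
    cases h0 : PySem.List.pyGet? o 0 with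
    | none => exact ih d
    | some a =>
      by_cases ha : pagesSet.contains a = true
      · simp only [ha, if_true]
        cases h1 : PySem.List.pyGet? o 1 with
        | none => exact ih d
        | some b =>
          by_cases hbv : pagesSet.contains b = true
          · simp only [hbv, if_true, List.foldl_cons]
            exact ih _
          · simp only [Bool.not_eq_true] at hbv
            simp only [hbv, Bool.false_eq_true, if_false]
            exact ih d
      · simp only [Bool.not_eq_true] at ha
        simp only [ha, Bool.false_eq_true, if_false]
        exact ih d

theorem pvFilter_swap (ps : List (Int × Int)) (k : Int) :
    ((ps.map Prod.swap).filter (fun p => p.1 == k)).map (fun x => x.2)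
      = ps.filterMap (fun p => if p.2 == k then some p.1 else none) := by
  induction ps with
  | nil => rfl
  | cons p ps ih =>
    simp only [List.map_cons, List.filter_cons, List.filterMap_cons, Prod.swap]
    by_cases h : p.2 == k
    · simp only [h, if_true, List.map_cons, ih]
    · simp only [h, Bool.false_eq_true, if_false, ih]

theorem pvDict_char (ps : List (Int × Int)) :
    (ps.foldl pvStepM PySem.Dict.empty).items
      = (PySem.List.dedup (ps.map (fun p => p.2))).map
          (fun k => (k, ps.filterMap (fun p => if p.2 == k then some p.1 else none))) := by
  have hfold : ps.foldl pvStepM PySem.Dict.empty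
      = ps.foldl (fun d p => d.modify p.2 [] (fun l => l ++ [p.1])) PySem.Dict.empty := rfl
  have hkeys := PySem.Dict.keys_foldl_modify_key (ν := List Int) ps (fun p => p.2) []
      (fun _ p l => l ++ [p.1]) PySem.Dict.empty
  have hnd := PySem.Dict.nodup_keys_foldl_modify_key (ν := List Int) ps (fun p => p.2) []
      (fun _ p l => l ++ [p.1]) PySem.Dict.empty PySem.Dict.nodup_keys_empty
  rw [hfold, PySem.Dict.items_eq_map_keys _ hnd []]
  rw [hkeys, PySem.Dict.keys_empty]
  have hset : PySem.Set.update ([] : List Int) (ps.map (fun p => p.2))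
      = PySem.List.dedup (ps.map (fun p => p.2)) := by
    rw [PySem.List.dedup_eq_ofList]
    exact PySem.Set.update_empty _
  rw [hset]
  apply List.map_congr_left
  intro k _
  have hswap : ps.foldl (fun d p => d.modify p.2 [] (fun l => l ++ [p.1])) PySem.Dict.empty
      = (ps.map Prod.swap).foldl (fun d p => d.modify p.1 [] (fun l => l ++ [p.2])) PySem.Dict.empty := by
    rw [List.foldl_map]
    simp only [Prod.fst_swap, Prod.snd_swap]
  rw [hswap, PySem.Dict.getD_foldl_modify_append, PySem.Dict.getD_empty, List.nil_append,
    pvFilter_swap]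

-- ===== VERDICT (by name: the statement is the Claim_ definition above) =====
theorem construct_inverse_orderings_spec : Claim_equal_construct_inverse_orderings := by
  intro orderings pages _ _
  show construct_inverse_orderings orderings pages = construct_inverse_orderings_alt orderings pages
  unfold construct_inverse_orderings construct_inverse_orderings_alt
  dsimp only
  rw [pvA_fold_guard, pvStepA_eq_stepM, pvDict_char]
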